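-- pv_equiv track=rewrite | github.com/philippdrebes/MSCIDS_PDS01 | Pycharm/SW06/exercises/0030_Exercise02_Sort_of_Dict_Tuple_List_Solution.py | aufgabe10
-- ===== SOURCE A (Python) =====
-- def aufgabe10(tuples):
--     min = None
--     max = None
--     for element in tuples:
--         if min is None or min > element:
--             min = element
--         if max is None or max < element:
--             max = element
--     return min, max
-- ===== SOURCE B (Python) =====
-- def aufgabe10(tuples):
--     if not tuples:
--         return None, None
--     return min(tuples), max(tuples)
-- ===== Notes on version B (the rewrite author's own statement) =====
-- stated objective: idiomatic
-- what changed: Replaces A's single manual scan maintaining two optional accumulators with an empty-list guard plus the two built-ins min() and max(), each a separate library scan.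
-- outside the precondition, e.g. on aufgabe10([]): A returns (None, None), B returns (None, None)
import Mathlib
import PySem

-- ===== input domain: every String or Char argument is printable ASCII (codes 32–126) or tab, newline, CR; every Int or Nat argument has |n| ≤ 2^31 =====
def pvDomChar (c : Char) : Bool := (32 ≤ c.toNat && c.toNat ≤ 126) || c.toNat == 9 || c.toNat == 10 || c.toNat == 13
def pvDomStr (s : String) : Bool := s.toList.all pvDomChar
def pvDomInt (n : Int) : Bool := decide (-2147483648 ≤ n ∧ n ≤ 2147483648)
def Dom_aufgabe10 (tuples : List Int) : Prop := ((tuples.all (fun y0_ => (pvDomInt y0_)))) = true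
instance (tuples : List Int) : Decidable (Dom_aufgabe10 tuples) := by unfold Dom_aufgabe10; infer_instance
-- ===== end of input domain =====

-- B replaces A's single manual two-accumulator scan with an empty guard plus the built-ins min()/max() (idiomatic; same cost).


-- ===== PORT A =====
-- A's loop: two optional accumulators updated per element (strict comparisons keep the first extremum).
def aufgabe10Step (s : Option Int × Option Int) (e : Int) : Option Int × Option Int :=
  ((match s.1 with
    | none => some e
    | some m => if m > e then some e else some m),
   (match s.2 with
    | none => some e
    | some M => if M < e then some e else some M))

def aufgabe10 (tuples : List Int) : Int × Int :=
  let st := tuples.foldl aufgabe10Step (none, none)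
  -- Python returns (None, None) on []; Pre_ excludes that input, so .getD 0 is never reached
  (st.1.getD 0, st.2.getD 0)

-- ===== PORT B =====
def aufgabe10_alt (tuples : List Int) : Int × Int :=
  -- on [] the Python B returns (None, None), excluded by Pre_; .getD 0 never reached
  ((PySem.List.min? tuples (fun x => x)).getD 0,
   (PySem.List.max? tuples (fun x => x)).getD 0)

-- ===== PRECONDITION & SPEC =====
-- Pre_ excludes only the empty list, on which both Pythons return (None, None), which is not a value of Int × Int.
def Pre_aufgabe10 (tuples : List Int) : Prop := tuples ≠ []
instance (tuples : List Int) : Decidable (Pre_aufgabe10 tuples) := by unfold Pre_aufgabe10; infer_instance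
def pvWitness_aufgabe10 : List Int := [3, -1, 4, -1, 5]

def Spec_aufgabe10 (tuples : List Int) (out : Int × Int) : Prop := out = aufgabe10_alt tuples
instance (tuples : List Int) (out : Int × Int) : Decidable (Spec_aufgabe10 tuples out) := by unfold Spec_aufgabe10; infer_instance

-- ===== CLAIM (what is proved, stated in full; the proofs are below) =====
def Claim_equal_aufgabe10 : Prop := ∀ (tuples : List Int), Dom_aufgabe10 tuples → Pre_aufgabe10 tuples → Spec_aufgabe10 tuples (aufgabe10 tuples)

-- ===== LEMMAS AND PROOFS =====

-- A's fold, once both accumulators are set, is the running min/max fold.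
theorem aufgabe10_fold (t : List Int) (m M : Int) :
    t.foldl aufgabe10Step (some m, some M)
      = (some (t.foldl min m), some (t.foldl max M)) := by
  induction t generalizing m M with
  | nil => rfl
  | cons e t ih =>
    simp only [List.foldl_cons]
    rw [show aufgabe10Step (some m, some M) e = (some (min m e), some (max M e)) by
      simp only [aufgabe10Step, min_def, max_def, Prod.mk.injEq]
      constructor <;> split_ifs <;> simp only [Option.some.injEq] <;> omega]
    exact ih _ _

-- ===== VERDICT (by name: the statement is the Claim_ definition above) =====
theorem aufgabe10_spec : Claim_equal_aufgabe10 := by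
  intro tuples _ hpre
  unfold Spec_aufgabe10
  match tuples with
  | [] => exact absurd rfl hpre
  | x :: t =>
    simp [aufgabe10, aufgabe10_alt, List.foldl_cons,
      show aufgabe10Step (none, none) x = (some x, some x) from rfl,
      aufgabe10_fold, PySem.List.min?_id_cons, PySem.List.max?_id_cons]
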